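-- pv_equiv track=rewrite | github.com/inetrg/inet-nm | src/inet_nm/location.py | merge_location_cache_chunks
-- ===== SOURCE A (Python) =====
-- from typing import Dict, List
--
-- def merge_location_cache_chunks(caches: List[List[Dict]]):
--     """
--     Merge location cache chunks into a single cache.
--
--     Due to only being able to power on a chunk at a time we need to sort
--     through each of the location caches and look through all id_paths that
--     have a missing state and see if they are available in another chunk.
--     If they are then probably they were just powered off.
--
--     Args:
--         caches: List of location cache chunks.
--
--     Returns:
--         The merged location cache.
--     """
--     # TODO: Also check if all id_paths that are attached have the same node_uid
--     tmp_cache = {}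
--     for chunk in caches:
--         for entry in chunk:
--             # If entry is empty, skip it
--             if not entry:
--                 continue
--             if entry["state"] != "missing":
--                 tmp_cache[entry["id_path"]] = entry
--                 continue
--             if entry["state"] == "missing" and entry["id_path"] not in tmp_cache:
--                 tmp_cache[entry["id_path"]] = entry
--     # Convert tmp_cache to list
--     cache = list(tmp_cache.values())
--     cache.sort(key=lambda x: x["id_path"])
--     return cache
-- ===== SOURCE B (Python) =====
-- def merge_location_cache_chunks(caches):
--     """Group entries by id_path, then per group pick the last non-missing entry,
--     falling back to the group's first (missing) entry; emit groups in sorted key order."""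
--     groups = {}
--     for chunk in caches:
--         for entry in chunk:
--             if entry:
--                 groups.setdefault(entry["id_path"], []).append(entry)
--     result = []
--     for key in sorted(groups):
--         grp = groups[key]
--         real = [e for e in grp if e["state"] != "missing"]
--         result.append(real[-1] if real else grp[0])
--     return result
-- ===== Notes on version B (the rewrite author's own statement) =====
-- stated objective: alternative
-- what changed: Replaces A's single incremental pass (a dict of current winners with per-entry overwrite/guard branching) by a group-then-select scheme: one pass groups every non-empty entry into lists keyed by id_path, then each group independently yields its last non-missing entry, or its first entry if all are missing, emitted in sorted key order.
import Mathlib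
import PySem

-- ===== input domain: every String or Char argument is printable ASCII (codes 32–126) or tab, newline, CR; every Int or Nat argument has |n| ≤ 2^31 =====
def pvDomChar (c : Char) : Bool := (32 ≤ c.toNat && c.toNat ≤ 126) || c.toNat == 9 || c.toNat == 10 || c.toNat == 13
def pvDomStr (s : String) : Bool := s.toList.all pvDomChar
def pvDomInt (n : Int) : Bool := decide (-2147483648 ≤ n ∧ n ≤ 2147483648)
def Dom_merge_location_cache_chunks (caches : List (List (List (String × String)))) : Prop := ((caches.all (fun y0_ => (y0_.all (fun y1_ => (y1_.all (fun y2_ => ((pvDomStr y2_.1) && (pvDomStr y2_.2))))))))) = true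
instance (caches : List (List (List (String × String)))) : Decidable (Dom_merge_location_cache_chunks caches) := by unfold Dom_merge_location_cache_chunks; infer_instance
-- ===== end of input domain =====

-- B replaces A's incremental winner-dict (overwrite non-missing, guard missing) by group-by-id_path
-- then per-group selection (last non-missing, else the group's first entry), in sorted key order.

-- entry["k"]: first-match lookup in the entry's association list; exact on Pre_, which
-- guarantees the key is present (Python raises KeyError otherwise) and the keys are unique.
def entGet (e : List (String × String)) (k : String) : String :=
  ((PySem.Dict.mk e).get? k).getD ""

-- ===== PORT A =====
def merge_location_cache_chunks (caches : List (List (List (String × String)))) : List (List (String × String)) :=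
  let tmp_cache : PySem.Dict String (List (String × String)) :=
    caches.foldl (fun tmp chunk =>
      chunk.foldl (fun tmp entry =>
        if entry = [] then tmp
        else if entGet entry "state" ≠ "missing" then
          tmp.insert (entGet entry "id_path") entry
        else if entGet entry "state" = "missing" ∧ tmp.contains (entGet entry "id_path") = false then
          tmp.insert (entGet entry "id_path") entry
        else tmp) tmp) PySem.Dict.empty
  PySem.List.sorted tmp_cache.values (fun x => entGet x "id_path") false

-- ===== PORT B =====
def merge_location_cache_chunks_alt (caches : List (List (List (String × String)))) : List (List (String × String)) :=
  let groups : PySem.Dict String (List (List (String × String))) :=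
    caches.foldl (fun g chunk =>
      chunk.foldl (fun g entry =>
        if entry = [] then g
        else g.modify (entGet entry "id_path") [] (fun l => l ++ [entry])) g) PySem.Dict.empty
  (PySem.List.sorted groups.keys (fun k => k) false).map (fun k =>
    let grp := groups.getD k []
    let real := grp.filter (fun e => entGet e "state" ≠ "missing")
    match real.getLast? with        -- real[-1] if real else grp[0]
    | some v => v
    | none => grp.headD [])         -- grp is non-empty for every k in groups; headD makes grp[0] total

-- ===== PRECONDITION & SPEC =====
-- Pre_ excludes entries whose association list has duplicate keys (a Python dict cannot carry
-- duplicates, so such a list is not a faithful image of A's dict-valued input), and non-empty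
-- entries lacking a "state" or "id_path" key, on which A raises KeyError.
def Pre_merge_location_cache_chunks (caches : List (List (List (String × String)))) : Prop :=
  ∀ chunk ∈ caches, ∀ e ∈ chunk,
    (e.map Prod.fst).Nodup ∧
    (e ≠ [] → "state" ∈ e.map Prod.fst ∧ "id_path" ∈ e.map Prod.fst)
instance (caches : List (List (List (String × String)))) : Decidable (Pre_merge_location_cache_chunks caches) := by
  unfold Pre_merge_location_cache_chunks; infer_instance

def pvWitness_merge_location_cache_chunks : (List (List (List (String × String)))) :=
  [[[("state", "missing"), ("id_path", "a")], []],
   [[("state", "ok"), ("id_path", "a"), ("node_uid", "n1")]]]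

def Spec_merge_location_cache_chunks (caches : List (List (List (String × String)))) (out : List (List (String × String))) : Prop := out = merge_location_cache_chunks_alt caches
instance (caches : List (List (List (String × String)))) (out : List (List (String × String))) : Decidable (Spec_merge_location_cache_chunks caches out) := by unfold Spec_merge_location_cache_chunks; infer_instance

-- ===== CLAIM (what is proved, stated in full; the proofs are below) =====
def Claim_equal_merge_location_cache_chunks : Prop := ∀ (caches : List (List (List (String × String)))), Dom_merge_location_cache_chunks caches → Pre_merge_location_cache_chunks caches → Spec_merge_location_cache_chunks caches (merge_location_cache_chunks caches)

-- ===== LEMMAS AND PROOFS =====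

-- Proof-side names for the two loop bodies (the ports inline them; each is rfl-equal to its port's body).
def stepA (tmp : PySem.Dict String (List (String × String))) (entry : List (String × String)) :
    PySem.Dict String (List (String × String)) :=
  if entry = [] then tmp
  else if entGet entry "state" ≠ "missing" then
    tmp.insert (entGet entry "id_path") entry
  else if entGet entry "state" = "missing" ∧ tmp.contains (entGet entry "id_path") = false then
    tmp.insert (entGet entry "id_path") entry
  else tmp

def stepG (g : PySem.Dict String (List (List (String × String)))) (entry : List (String × String)) :
    PySem.Dict String (List (List (String × String))) :=
  if entry = [] then g
  else g.modify (entGet entry "id_path") [] (fun l => l ++ [entry])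

-- last non-missing entry with id_path = k, and first missing entry with id_path = k
def lastNM (xs : List (List (String × String))) (k : String) : Option (List (String × String)) :=
  (xs.filter (fun e => e ≠ [] ∧ entGet e "state" ≠ "missing" ∧ entGet e "id_path" = k)).getLast?
def firstM (xs : List (List (String × String))) (k : String) : Option (List (String × String)) :=
  (xs.filter (fun e => e ≠ [] ∧ entGet e "state" = "missing" ∧ entGet e "id_path" = k)).head?

theorem getLast?_cons_or {α} (a : α) (l : List α) : (a :: l).getLast? = l.getLast?.or (some a) := by
  cases l with
  | nil => simp
  | cons b t =>
    rw [List.getLast?_cons_cons]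
    cases h : (b::t).getLast? with
    | none => simp [List.getLast?_eq_none_iff] at h
    | some x => simp [Option.or]

theorem getA (xs : List (List (String × String))) (d : PySem.Dict String (List (String × String))) (k : String) :
    (xs.foldl stepA d).get? k = (lastNM xs k).or ((d.get? k).or (firstM xs k)) := by
  induction xs generalizing d with
  | nil => simp [lastNM, firstM]
  | cons e rest ih =>
    rw [List.foldl_cons, ih]
    by_cases he : e = []
    · simp [lastNM, firstM, he, stepA]
    by_cases hs : entGet e "state" = "missing"
    · -- missing branch
      by_cases hk : entGet e "id_path" = k
      · by_cases hc : d.contains (entGet e "id_path") = false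
        · have hn : d.get? k = none := by
            have := PySem.Dict.contains_eq_isSome_get? d (entGet e "id_path")
            rw [hc] at this; rw [← hk]; cases h : d.get? (entGet e "id_path") <;> simp_all
          rw [hk] at hc
          simp [lastNM, firstM, he, hs, hk, stepA, hc, hn,
            PySem.Dict.get?_insert_self]
        · have hv : ∃ v, d.get? k = some v := by
            have := PySem.Dict.contains_eq_isSome_get? d (entGet e "id_path")
            rw [← hk]
            cases h : d.get? (entGet e "id_path")
            · rw [h] at this; simp at this; simp [this] at hc
            · exact ⟨_, rfl⟩
          obtain ⟨v, hv⟩ := hv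
          rw [hk] at hc
          simp [lastNM, firstM, he, hs, hk, stepA, hc, hv]
      · simp [lastNM, firstM, he, hs, hk, stepA]
        by_cases hc : d.contains (entGet e "id_path") = false <;>
          simp [hc, PySem.Dict.get?_insert_of_ne _ _ (Ne.symm hk)]
    · by_cases hk : entGet e "id_path" = k
      · simp [lastNM, firstM, he, hs, hk, stepA, getLast?_cons_or,
          PySem.Dict.get?_insert_self]
      · simp [lastNM, firstM, he, hs, hk, stepA,
          PySem.Dict.get?_insert_of_ne _ _ (Ne.symm hk)]

-- a step that either leaves the dict alone or inserts entry e at key (entGet e "id_path")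
theorem foldl_step_props
    (step : PySem.Dict String (List (String × String)) → List (String × String) → PySem.Dict String (List (String × String)))
    (hstep : ∀ d e, step d e = d ∨ step d e = d.insert (entGet e "id_path") e)
    (xs : List (List (String × String))) (d : PySem.Dict String (List (String × String)))
    (hnd : d.keys.Nodup) (hinv : ∀ p ∈ d.items, entGet p.2 "id_path" = p.1) :
    (xs.foldl step d).keys.Nodup ∧ ∀ p ∈ (xs.foldl step d).items, entGet p.2 "id_path" = p.1 := by
  induction xs generalizing d with
  | nil => exact ⟨hnd, hinv⟩
  | cons e rest ih =>
    rw [List.foldl_cons]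
    rcases hstep d e with h | h
    · rw [h]; exact ih d hnd hinv
    · rw [h]
      refine ih _ (PySem.Dict.nodup_keys_insert _ _ _ hnd) ?_
      intro p hp
      rcases (PySem.Dict.mem_items_insert _ _ _ _).1 hp with rfl | ⟨hp', _⟩
      · rfl
      · exact hinv p hp'

theorem hstepA : ∀ d e, stepA d e = d ∨ stepA d e = d.insert (entGet e "id_path") e := by
  intro d e; unfold stepA; split_ifs <;> first | (left; rfl) | (right; rfl)

-- B's grouping fold: the group stored at k is exactly the non-empty entries with id_path = k, in order
theorem getD_G (xs : List (List (String × String))) (g : PySem.Dict String (List (List (String × String)))) (k : String) :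
    (xs.foldl stepG g).getD k [] =
      g.getD k [] ++ xs.filter (fun e => e ≠ [] ∧ entGet e "id_path" = k) := by
  induction xs generalizing g with
  | nil => simp
  | cons e rest ih =>
    rw [List.foldl_cons, ih]
    by_cases he : e = []
    · simp [stepG, he]
    by_cases hk : entGet e "id_path" = k
    · rw [show stepG g e = g.modify (entGet e "id_path") [] (fun l => l ++ [e]) from by simp [stepG, he]]
      rw [hk, PySem.Dict.getD_modify_self]
      simp [he, hk]
    · rw [show stepG g e = g.modify (entGet e "id_path") [] (fun l => l ++ [e]) from by simp [stepG, he]]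
      rw [PySem.Dict.getD_modify_of_ne _ _ _ (Ne.symm hk)]
      simp [he, hk]

-- B's grouping fold: key list = first occurrences of id_paths of non-empty entries
theorem keys_G (xs : List (List (String × String))) :
    (xs.foldl stepG PySem.Dict.empty).keys =
      PySem.Set.ofList ((xs.filter (fun e => e ≠ [])).map (fun e => entGet e "id_path")) := by
  have h : xs.foldl stepG PySem.Dict.empty =
      (xs.filter (fun e => e ≠ [])).foldl
        (fun g e => g.modify (entGet e "id_path") [] (fun l => l ++ [e])) PySem.Dict.empty := by
    rw [List.foldl_filter]
    congr 1
    funext a b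
    by_cases hb : b = [] <;> simp [stepG, hb]
  rw [h,
    PySem.Dict.keys_foldl_modify_key (xs.filter (fun e => e ≠ []))
      (fun e => entGet e "id_path") [] (fun _ e => fun l => l ++ [e]) PySem.Dict.empty]
  simp [PySem.Set.update, PySem.Set.ofList_eq_foldl, PySem.Dict.keys_empty]

-- ===== VERDICT (by name: the statement is the Claim_ definition above) =====
theorem merge_location_cache_chunks_spec : Claim_equal_merge_location_cache_chunks := by
  intro caches _hdom _hpre
  -- both ports, with the nested folds rewritten as folds over the flattened entry list
  have hA : merge_location_cache_chunks caches =
      PySem.List.sorted (caches.flatten.foldl stepA PySem.Dict.empty).values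
        (fun x => entGet x "id_path") false := by
    show PySem.List.sorted ((caches.foldl (fun b xs => xs.foldl stepA b) PySem.Dict.empty).values)
        (fun x => entGet x "id_path") false = _
    rw [← List.foldl_flatten]
  have hB : merge_location_cache_chunks_alt caches =
      (PySem.List.sorted (caches.flatten.foldl stepG PySem.Dict.empty).keys (fun k => k) false).map
        (fun k =>
          let grp := (caches.flatten.foldl stepG PySem.Dict.empty).getD k []
          let real := grp.filter (fun e => entGet e "state" ≠ "missing")
          match real.getLast? with
          | some v => v
          | none => grp.headD []) := by
    have hG : caches.foldl (fun b xs => xs.foldl stepG b) PySem.Dict.empty =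
        caches.flatten.foldl stepG PySem.Dict.empty := List.foldl_flatten.symm
    show (PySem.List.sorted (caches.foldl (fun b xs => xs.foldl stepG b) PySem.Dict.empty).keys
        (fun k => k) false).map
        (fun k =>
          let grp := (caches.foldl (fun b xs => xs.foldl stepG b) PySem.Dict.empty).getD k []
          let real := grp.filter (fun e => entGet e "state" ≠ "missing")
          match real.getLast? with
          | some v => v
          | none => grp.headD []) = _
    rw [hG]
  set xs := caches.flatten with hxs
  set dA := xs.foldl stepA PySem.Dict.empty with hdA
  set dG := xs.foldl stepG PySem.Dict.empty with hdG
  set keyfn : List (String × String) → String := fun v => entGet v "id_path" with hkeyfn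
  set F : String → List (String × String) := (fun k =>
    let grp := dG.getD k []
    let real := grp.filter (fun e => entGet e "state" ≠ "missing")
    match real.getLast? with
    | some v => v
    | none => grp.headD []) with hF
  -- A's dict at k
  have hget : ∀ k, dA.get? k = (lastNM xs k).or (firstM xs k) := by
    intro k; rw [hdA, getA]; simp
  have hemp : (∀ p ∈ (PySem.Dict.empty : PySem.Dict String (List (String × String))).items,
      entGet p.2 "id_path" = p.1) := by intro p hp; simp [PySem.Dict.empty] at hp
  have propsA := foldl_step_props stepA hstepA xs PySem.Dict.empty
    (PySem.Dict.nodup_keys_empty) hemp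
  rw [← hdA] at propsA
  -- B's data
  set kl := (xs.filter (fun e => e ≠ [])).map keyfn with hkl
  have hkeys : dG.keys = PySem.Set.ofList kl := by rw [hdG, keys_G]
  have hgrp : ∀ k, dG.getD k [] = xs.filter (fun e => e ≠ [] ∧ entGet e "id_path" = k) := by
    intro k; rw [hdG, getD_G]; simp
  -- existence characterisations of lastNM / firstM
  have hL_ne : ∀ k, ¬ lastNM xs k = none ↔
      ∃ e ∈ xs, ¬ e = [] ∧ ¬ entGet e "state" = "missing" ∧ entGet e "id_path" = k := by
    intro k
    rw [lastNM, List.getLast?_eq_none_iff, List.filter_eq_nil_iff]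
    simp
  have hF_ne : ∀ k, ¬ firstM xs k = none ↔
      ∃ e ∈ xs, ¬ e = [] ∧ entGet e "state" = "missing" ∧ entGet e "id_path" = k := by
    intro k
    rw [firstM, List.head?_eq_none_iff, List.filter_eq_nil_iff]
    simp
  -- membership: k is a key of dA iff k ∈ kl
  have hmemkl : ∀ k, k ∈ dA.keys ↔ k ∈ kl := by
    intro k
    have h1 : k ∈ dA.keys ↔ ¬ dA.get? k = none := by
      rw [PySem.Dict.get?_eq_none_iff_not_mem_keys, not_not]
    have h2 : k ∈ kl ↔ ∃ e ∈ xs, ¬ e = [] ∧ entGet e "id_path" = k := by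
      rw [hkl]
      constructor
      · intro h
        obtain ⟨e, hef, hek⟩ := List.mem_map.mp h
        obtain ⟨he, hne⟩ := List.mem_filter.mp hef
        exact ⟨e, he, by simpa using hne, hek⟩
      · rintro ⟨e, he, hne, hek⟩
        exact List.mem_map.mpr ⟨e, List.mem_filter.mpr ⟨he, by simpa using hne⟩, hek⟩
    rw [h1, hget, h2]
    constructor
    · intro h
      have hnn : ¬ (lastNM xs k = none ∧ firstM xs k = none) := by
        intro hc; exact h (by rw [hc.1, hc.2]; rfl)
      by_cases hL : lastNM xs k = none
      · have hFn : ¬ firstM xs k = none := fun hFn => hnn ⟨hL, hFn⟩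
        obtain ⟨e, he, h1', h2', h3'⟩ := (hF_ne k).mp hFn
        exact ⟨e, he, h1', h3'⟩
      · obtain ⟨e, he, h1', h2', h3'⟩ := (hL_ne k).mp hL
        exact ⟨e, he, h1', h3'⟩
    · rintro ⟨e, he, hne, hek⟩ hor
      rw [Option.or_eq_none_iff] at hor
      by_cases hs : entGet e "state" = "missing"
      · exact (hF_ne k).mpr ⟨e, he, hne, hs, hek⟩ hor.2
      · exact (hL_ne k).mpr ⟨e, he, hne, hs, hek⟩ hor.1
  -- the A-side sorted list
  have hmapA : dA.values.map keyfn = dA.keys := by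
    show (dA.items.map (fun p => p.2)).map keyfn = dA.items.map (fun p => p.1)
    rw [List.map_map]
    exact List.map_congr_left (fun p hp => propsA.2 p hp)
  set sA := PySem.List.sorted dA.values keyfn false with hsA
  have hle : sA.Pairwise (fun a b => keyfn a ≤ keyfn b) := PySem.List.sorted_pairwise dA.values keyfn
  have hpermkeys : (sA.map keyfn).Perm dA.keys := by
    rw [← hmapA]; exact (PySem.List.sorted_perm dA.values keyfn false).map keyfn
  have hnodupmap : (sA.map keyfn).Nodup := hpermkeys.nodup_iff.mpr propsA.1
  have hne : sA.Pairwise (fun a b => keyfn a ≠ keyfn b) := List.pairwise_map.mp hnodupmap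
  have hlt : sA.Pairwise (fun a b => keyfn a < keyfn b) :=
    (hle.and hne).imp (fun h => lt_of_le_of_ne h.1 h.2)
  -- B's sorted key list equals sA.map keyfn
  have hpermSet : (sA.map keyfn).Perm (PySem.Set.ofList kl) := by
    refine hpermkeys.trans ?_
    refine (List.perm_ext_iff_of_nodup propsA.1 (PySem.Set.nodup_ofList kl)).mpr ?_
    intro k
    rw [hmemkl, PySem.Set.mem_ofList]
  have hsortkeys : PySem.List.sorted (PySem.Set.ofList kl) (fun k => k) false = sA.map keyfn :=
    PySem.List.sorted_eq_of_perm_of_pairwise_lt _ _ _ hpermSet (List.pairwise_map.mpr hlt)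
  -- the per-key selection returns each value of sA at its own key
  have hsel : ∀ v ∈ sA, F (keyfn v) = v := by
    intro v hv
    have hvv : v ∈ dA.values := (PySem.List.sorted_perm dA.values keyfn false).subset hv
    obtain ⟨p, hp, hp2⟩ := List.mem_map.mp (show v ∈ dA.items.map (fun q => q.2) from hvv)
    obtain ⟨k, v2⟩ := p
    simp only at hp2
    rw [hp2] at hp
    have hkv : keyfn v = k := propsA.2 (k, v) hp
    have hgk : dA.get? k = some v := PySem.Dict.get?_of_mem_items dA hp propsA.1
    rw [hget] at hgk
    rw [hkv]
    show (match ((dG.getD k []).filter (fun e => entGet e "state" ≠ "missing")).getLast? with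
          | some w => w
          | none => (dG.getD k []).headD []) = v
    have hrealL : ((dG.getD k []).filter (fun e => entGet e "state" ≠ "missing")).getLast? =
        lastNM xs k := by
      rw [lastNM, hgrp k, List.filter_filter]
      congr 1
      apply List.filter_congr
      intro e _
      cases h1 : decide (e = []) <;> cases h2 : decide (entGet e "state" = "missing") <;>
        cases h3 : decide (entGet e "id_path" = k) <;> simp_all
    rw [hrealL]
    cases hL : lastNM xs k with
    | some w =>
      rw [hL, Option.some_or] at hgk
      exact Option.some.inj hgk
    | none =>
      rw [hL, Option.none_or] at hgk
      rw [lastNM, List.getLast?_eq_none_iff, List.filter_eq_nil_iff] at hL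
      have hallm : ∀ e ∈ xs, ¬ e = [] → entGet e "id_path" = k → entGet e "state" = "missing" := by
        intro e he hne hik
        by_contra hs
        have := hL e he
        simp [hne, hs, hik] at this
      have hgm : dG.getD k [] =
          xs.filter (fun e => e ≠ [] ∧ entGet e "state" = "missing" ∧ entGet e "id_path" = k) := by
        rw [hgrp k]
        apply List.filter_congr
        intro e he
        by_cases h1 : e = []
        · simp [h1]
        · by_cases h3 : entGet e "id_path" = k
          · simp [h1, h3, hallm e he h1 h3]
          · simp [h1, h3]
      rw [hgm]
      rw [firstM] at hgk
      cases hh : xs.filter (fun e => e ≠ [] ∧ entGet e "state" = "missing" ∧ entGet e "id_path" = k) with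
      | nil => rw [hh] at hgk; simp at hgk
      | cons a t => rw [hh] at hgk; simp at hgk; simp [hgk]
  -- assemble
  show Spec_merge_location_cache_chunks caches (merge_location_cache_chunks caches)
  unfold Spec_merge_location_cache_chunks
  rw [hA, hB, hkeys, hsortkeys, List.map_map]
  symm
  calc sA.map (F ∘ keyfn) = sA.map (fun v => v) :=
        List.map_congr_left (fun v hv => hsel v hv)
    _ = sA := by simp
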